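-- pv_equiv track=rewrite | github.com/VitorFalcochio/cotai | AUTOCAD IA/autocad_ia/text_parser.py | _section_level_for_match
-- ===== SOURCE A (Python) =====
-- SECTION_MARKERS = {
--     0: ("terreo", "pavimento terreo", "andar terreo"),
--     1: ("pavimento superior", "andar superior", "segundo andar", "segundo pavimento", "piso superior"),
--     2: ("terceiro andar", "terceiro pavimento"),
-- }
--
-- def _section_level_for_match(index: int, text: str, floors: int) -> int:
--     if floors <= 1:
--         return 0
--     lower_text = text.lower()
--     nearest_level = 0
--     best_distance = None
--     for level, markers in SECTION_MARKERS.items():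
--         for marker in markers:
--             marker_index = lower_text.rfind(marker, 0, index + 1)
--             if marker_index < 0:
--                 continue
--             distance = index - marker_index
--             if best_distance is None or distance < best_distance:
--                 best_distance = distance
--                 nearest_level = level
--     return nearest_level
-- ===== SOURCE B (Python) =====
-- SECTION_MARKERS = {
--     0: ("terreo", "pavimento terreo", "andar terreo"),
--     1: ("pavimento superior", "andar superior", "segundo andar", "segundo pavimento", "piso superior"),
--     2: ("terceiro andar", "terceiro pavimento"),
-- }
--
-- def _section_level_for_match(index: int, text: str, floors: int) -> int:
--     if floors <= 1:
--         return 0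
--     region = text.lower()[:index + 1]
--     for pos in range(len(region) - 1, -1, -1):
--         for level, markers in SECTION_MARKERS.items():
--             for marker in markers:
--                 if region.startswith(marker, pos):
--                     return level
--     return 0
-- ===== Notes on version B (the rewrite author's own statement) =====
-- stated objective: alternative
-- what changed: Replaces the per-marker backward rfind searches plus running minimum-distance bookkeeping by one backward positional scan of the sliced region text.lower()[:index+1], returning the level of the first marker (in dict order) that starts at the highest position.
import Mathlib
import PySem

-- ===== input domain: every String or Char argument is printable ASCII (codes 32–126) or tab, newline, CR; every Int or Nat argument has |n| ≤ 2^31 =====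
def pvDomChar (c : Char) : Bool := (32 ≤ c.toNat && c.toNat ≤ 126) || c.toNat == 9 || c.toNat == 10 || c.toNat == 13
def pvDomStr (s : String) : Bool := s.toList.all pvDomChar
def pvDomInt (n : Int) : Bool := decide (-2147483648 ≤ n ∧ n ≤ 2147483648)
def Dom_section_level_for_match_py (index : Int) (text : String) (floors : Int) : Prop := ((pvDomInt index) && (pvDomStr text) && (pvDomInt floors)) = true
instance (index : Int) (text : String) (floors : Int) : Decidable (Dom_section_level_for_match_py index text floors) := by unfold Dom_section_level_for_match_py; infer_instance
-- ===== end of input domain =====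

-- B replaces A's per-marker backward rfind searches and minimum-distance bookkeeping by one
-- backward positional scan of the sliced region text.lower()[:index+1] (objective: alternative).

-- ===== PORT A =====
def sectionMarkersA : List (Int × List String) :=
  [(0, ["terreo", "pavimento terreo", "andar terreo"]),
   (1, ["pavimento superior", "andar superior", "segundo andar", "segundo pavimento", "piso superior"]),
   (2, ["terceiro andar", "terceiro pavimento"])]

def section_level_for_match_py (index : Int) (text : String) (floors : Int) : Int :=
  if floors ≤ 1 then 0
  else
    let lowerText := PySem.Str.lower text
    let st := sectionMarkersA.foldl (fun (st : Int × Option Int) lm =>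
      lm.2.foldl (fun (st : Int × Option Int) marker =>
        let markerIndex := PySem.Str.rfindFrom lowerText marker 0 (some (index + 1))
        if markerIndex < 0 then st
        else
          let distance := index - markerIndex
          match st.2 with
          | none => (lm.1, some distance)
          | some bestDistance =>
            if distance < bestDistance then (lm.1, some distance) else st) st)
      ((0 : Int), (none : Option Int))
    st.1

-- ===== PORT B =====
-- (SECTION_MARKERS is the same module-level constant; B reuses sectionMarkersA)
-- region.startswith(marker, pos): exact for 0 ≤ pos ≤ len(region) as marker prefix of region[pos:]
def bMatchAt (region : List Char) (pos : Nat) : Option Int :=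
  sectionMarkersA.findSome? (fun lm =>
    lm.2.findSome? (fun marker =>
      if PySem.Chars.startswith (region.drop pos) marker.toList then some lm.1 else none))

-- 'for pos in range(len(region)-1, -1, -1): … return level' as a structural countdown
def bScan (region : List Char) : Nat → Int
  | 0 => 0
  | Nat.succ pos =>
    match bMatchAt region pos with
    | some level => level
    | none => bScan region pos

def section_level_for_match_py_alt (index : Int) (text : String) (floors : Int) : Int :=
  if floors ≤ 1 then 0
  else
    let region := (PySem.Str.slice (PySem.Str.lower text) none (some (index + 1))).toList
    bScan region region.length

-- ===== PRECONDITION & SPEC =====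
def Spec_section_level_for_match_py (index : Int) (text : String) (floors : Int) (out : Int) : Prop := out = section_level_for_match_py_alt index text floors
instance (index : Int) (text : String) (floors : Int) (out : Int) : Decidable (Spec_section_level_for_match_py index text floors out) := by unfold Spec_section_level_for_match_py; infer_instance

-- ===== CLAIM (what is proved, stated in full; the proofs are below) =====
def Claim_equal_section_level_for_match_py : Prop := ∀ (index : Int) (text : String) (floors : Int), Dom_section_level_for_match_py index text floors → Spec_section_level_for_match_py index text floors (section_level_for_match_py index text floors)

-- ===== LEMMAS AND PROOFS =====


theorem go_zero (s sub : List Char) : PySem.Chars.rfind.go s sub 0 = if sub.isPrefixOf s then 0 else -1 := rfl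
theorem go_succ (s sub : List Char) (j : Nat) :
    PySem.Chars.rfind.go s sub (j+1) =
      if sub.isPrefixOf (s.drop (j+1)) then ((j:Int)+1) else PySem.Chars.rfind.go s sub j := by
  rw [PySem.Chars.rfind.go]; split <;> push_cast <;> ring

theorem go_ge (s sub : List Char) (k : Nat) : -1 ≤ PySem.Chars.rfind.go s sub k := by
  induction k with
  | zero => rw [go_zero]; split <;> norm_num
  | succ j ih => rw [go_succ]; split <;> push_cast <;> omega

theorem go_neg1_iff (s sub : List Char) (k : Nat) :
    PySem.Chars.rfind.go s sub k = -1 ↔ ∀ p : Nat, p ≤ k → ¬ sub <+: s.drop p := by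
  induction k with
  | zero =>
    rw [go_zero]
    split_ifs with h
    · constructor
      · intro h0; exact absurd h0 (by norm_num)
      · intro hall; exact absurd (List.isPrefixOf_iff_prefix.mp h) (by simpa using hall 0 le_rfl)
    · simp only [true_iff]  -- may fail; fallback below
      intro p hp
      interval_cases p
      simp only [List.drop_zero]
      exact fun hc => h (List.isPrefixOf_iff_prefix.mpr hc)
  | succ j ih =>
    rw [go_succ]
    split_ifs with h
    · constructor
      · intro h0; exact absurd h0 (by push_cast; omega)
      · intro hall; exact absurd (List.isPrefixOf_iff_prefix.mp h) (hall (j+1) le_rfl)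
    · rw [ih]
      constructor
      · intro hall p hp
        rcases Nat.lt_succ_iff_lt_or_eq.mp (Nat.lt_succ_of_le hp) with h1 | h1
        · exact hall p (by omega)
        · subst h1; exact fun hc => h (List.isPrefixOf_iff_prefix.mpr hc)
      · intro hall p hp; exact hall p (by omega)

theorem go_pos (s sub : List Char) (k : Nat) (h : PySem.Chars.rfind.go s sub k ≠ -1) :
    ∃ p : Nat, PySem.Chars.rfind.go s sub k = (p : Int) ∧ p ≤ k ∧ sub <+: s.drop p ∧
      ∀ q : Nat, p < q → q ≤ k → ¬ sub <+: s.drop q := by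
  induction k with
  | zero =>
    rw [go_zero] at h ⊢
    split_ifs at h ⊢ with hpre
    · exact ⟨0, rfl, le_rfl, by simpa using List.isPrefixOf_iff_prefix.mp hpre, fun q hq hq' => by omega⟩
    · exact absurd rfl h
  | succ j ih =>
    rw [go_succ] at h ⊢
    split_ifs at h ⊢ with hpre
    · exact ⟨j+1, by push_cast; ring, le_rfl, List.isPrefixOf_iff_prefix.mp hpre,
        fun q hq hq' => by omega⟩
    · obtain ⟨p, hval, hle, hmatch, habove⟩ := ih h
      refine ⟨p, hval, by omega, hmatch, fun q hq hq' => ?_⟩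
      rcases Nat.lt_succ_iff_lt_or_eq.mp (Nat.lt_succ_of_le hq') with h1 | h1
      · exact habove q hq (by omega)
      · subst h1; exact fun hc => hpre (List.isPrefixOf_iff_prefix.mpr hc)

theorem go_nil (s : List Char) (k : Nat) : PySem.Chars.rfind.go s [] k = (k : Int) := by
  induction k with
  | zero => rw [go_zero]; simp [List.isPrefixOf_iff_prefix]
  | succ j ih => rw [go_succ]; simp [List.isPrefixOf_iff_prefix]

theorem rfind_neg1_iff (r sub : List Char) :
    PySem.Chars.rfind r sub = -1 ↔ ∀ p : Nat, ¬ sub <+: r.drop p := by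
  unfold PySem.Chars.rfind
  constructor
  · intro h p
    by_cases hp : p ≤ r.length
    · exact (go_neg1_iff r sub r.length).mp h p hp
    · rw [List.drop_eq_nil_of_le (by omega)]
      intro hc
      have : sub = [] := List.prefix_nil.mp hc
      subst this
      rw [go_nil] at h; omega
  · intro hall
    exact (go_neg1_iff r sub r.length).mpr fun p hp => hall p

theorem rfind_pos (r sub : List Char) (hne : sub ≠ []) (h : PySem.Chars.rfind r sub ≠ -1) :
    ∃ p : Nat, PySem.Chars.rfind r sub = (p : Int) ∧ p < r.length ∧ sub <+: r.drop p ∧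
      ∀ q : Nat, p < q → ¬ sub <+: r.drop q := by
  unfold PySem.Chars.rfind at h ⊢
  obtain ⟨p, hval, hle, hmatch, habove⟩ := go_pos r sub r.length h
  have hlt : p < r.length := by
    rcases Nat.lt_or_ge p r.length with h1 | h1
    · exact h1
    · exfalso
      rw [List.drop_eq_nil_of_le h1] at hmatch
      exact hne (List.prefix_nil.mp hmatch)
  refine ⟨p, hval, hlt, hmatch, fun q hq => ?_⟩
  by_cases hq' : q ≤ r.length
  · exact habove q hq hq'
  · rw [List.drop_eq_nil_of_le (by omega)]
    exact fun hc => hne (List.prefix_nil.mp hc)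

def aStep (index : Int) (r : List Char) (st : Int × Option Int) (lm : Int × List Char) : Int × Option Int :=
  let v := PySem.Chars.rfind r lm.2
  if v < 0 then st
  else
    let d := index - v
    match st.2 with
    | none => (lm.1, some d)
    | some bd => if d < bd then (lm.1, some d) else st

def bestOf (r : List Char) : List (Int × List Char) → Option (Int × Int)
  | [] => none
  | lm :: t =>
    let v := PySem.Chars.rfind r lm.2
    if v < 0 then bestOf r t
    else
      match bestOf r t with
      | none => some (lm.1, v)
      | some (lv', v') => if v < v' then some (lv', v') else some (lm.1, v)

theorem rfind_ge (r sub : List Char) : -1 ≤ PySem.Chars.rfind r sub := go_ge r sub r.length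

theorem bestOf_none_iff (r : List Char) (L : List (Int × List Char)) :
    bestOf r L = none ↔ ∀ lm ∈ L, PySem.Chars.rfind r lm.2 = -1 := by
  induction L with
  | nil => simp [bestOf]
  | cons lm t ih =>
    simp only [bestOf]
    split_ifs with hv
    · rw [ih]
      have h1 : PySem.Chars.rfind r lm.2 = -1 := by have := rfind_ge r lm.2; omega
      simp [h1]
    · constructor
      · intro h
        cases hbt : bestOf r t with
        | none => rw [hbt] at h; simp at h
        | some p =>
          obtain ⟨a, b⟩ := p
          rw [hbt] at h
          simp only [] at h
          split_ifs at h <;> simp at h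
      · intro h
        have := h lm (by simp)
        omega

theorem bestOf_nonneg (r : List Char) (L : List (Int × List Char)) (lv v : Int)
    (h : bestOf r L = some (lv, v)) : 0 ≤ v := by
  induction L generalizing lv v with
  | nil => simp [bestOf] at h
  | cons lm t ih =>
    simp only [bestOf] at h
    split_ifs at h with hv
    · exact ih lv v h
    · split at h
      · simp at h; omega
      · rename_i lv' v' heq
        split_ifs at h with hlt <;> simp at h
        · obtain ⟨h1, h2⟩ := h
          rw [h1, h2] at heq
          exact ih _ _ heq
        · omega

theorem bestOf_ub (r : List Char) (L : List (Int × List Char)) (lv v : Int)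
    (h : bestOf r L = some (lv, v)) : ∀ lm ∈ L, PySem.Chars.rfind r lm.2 ≤ v := by
  induction L generalizing lv v with
  | nil => simp [bestOf] at h
  | cons lm t ih =>
    simp only [bestOf] at h
    intro x hx
    rcases List.mem_cons.mp hx with h1 | h1
    · subst h1
      split_ifs at h with hv
      · have := bestOf_nonneg r t lv v h; omega
      · split at h
        · simp at h; omega
        · rename_i lv' v' heq
          split_ifs at h with hlt <;> simp at h <;> omega
    · split_ifs at h with hv
      · exact ih lv v h x h1
      · split at h
        · rename_i heq
          have := (bestOf_none_iff r t).mp heq x h1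
          simp at h; omega
        · rename_i lv' v' heq
          split_ifs at h with hlt <;> simp at h
          · obtain ⟨e1, e2⟩ := h
            rw [e1, e2] at heq
            exact ih _ _ heq x h1
          · obtain ⟨e1, e2⟩ := h
            have := ih _ _ heq x h1
            omega

theorem bestOf_first (r : List Char) (L : List (Int × List Char)) (lv v : Int)
    (h : bestOf r L = some (lv, v)) :
    ∃ L1 m L2, L = L1 ++ (lv, m) :: L2 ∧ PySem.Chars.rfind r m = v ∧
      ∀ lm ∈ L1, PySem.Chars.rfind r lm.2 < v := by
  induction L generalizing lv v with
  | nil => simp [bestOf] at h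
  | cons lm t ih =>
    simp only [bestOf] at h
    split_ifs at h with hv
    · obtain ⟨L1, m, L2, he, hm, hlt⟩ := ih lv v h
      refine ⟨lm :: L1, m, L2, by rw [he]; rfl, hm, ?_⟩
      intro x hx
      rcases List.mem_cons.mp hx with h1 | h1
      · subst h1
        have := bestOf_nonneg r t lv v h; omega
      · exact hlt x h1
    · split at h
      · rename_i heq
        simp at h
        obtain ⟨e1, e2⟩ := h
        refine ⟨[], lm.2, t, ?_, by omega, by simp⟩
        rw [← e1]; simp
      · rename_i lv' v' heq
        split_ifs at h with hlt <;> simp at h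
        · obtain ⟨e1, e2⟩ := h
          rw [e1, e2] at heq
          obtain ⟨L1, m, L2, he, hm, hstrict⟩ := ih lv v heq
          refine ⟨lm :: L1, m, L2, by rw [he]; rfl, hm, ?_⟩
          intro x hx
          rcases List.mem_cons.mp hx with h1 | h1
          · subst h1; omega
          · exact hstrict x h1
        · obtain ⟨e1, e2⟩ := h
          refine ⟨[], lm.2, t, ?_, by omega, by simp⟩
          rw [← e1]; simp

def comb (index : Int) (b : Option (Int × Int)) (lv0 : Int) (b0 : Option Int) : Int × Option Int :=
  match b with
  | none => (lv0, b0)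
  | some (lv, v) =>
    match b0 with
    | none => (lv, some (index - v))
    | some d0 => if index - v < d0 then (lv, some (index - v)) else (lv0, some d0)

theorem foldl_aStep_bestOf (index : Int) (r : List Char) (L : List (Int × List Char)) :
    ∀ lv0 : Int, ∀ b0 : Option Int,
      L.foldl (aStep index r) (lv0, b0) = comb index (bestOf r L) lv0 b0 := by
  induction L with
  | nil => intro lv0 b0; simp [bestOf, comb]
  | cons lm t ih =>
    intro lv0 b0
    rw [List.foldl_cons]
    by_cases hv : PySem.Chars.rfind r lm.2 < 0
    · have hbe : bestOf r (lm :: t) = bestOf r t := by simp [bestOf, hv]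
      have hstep : aStep index r (lv0, b0) lm = (lv0, b0) := by simp [aStep, hv]
      rw [hstep, hbe]
      exact ih lv0 b0
    · cases b0 with
      | none =>
        have hstep : aStep index r (lv0, none) lm = (lm.1, some (index - PySem.Chars.rfind r lm.2)) := by
          simp [aStep, hv]
        rw [hstep, ih]
        cases hbt : bestOf r t with
        | none =>
          have hbe : bestOf r (lm :: t) = some (lm.1, PySem.Chars.rfind r lm.2) := by
            simp [bestOf, hv, hbt]
          rw [hbe]
          simp [comb]
        | some p =>
          obtain ⟨lv', v'⟩ := p
          have hub := bestOf_nonneg r t lv' v' hbt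
          by_cases hc : PySem.Chars.rfind r lm.2 < v'
          · have hbe : bestOf r (lm :: t) = some (lv', v') := by simp [bestOf, hv, hbt, hc]
            rw [hbe]
            try simp only [comb]
            try split_ifs <;> first | rfl | omega | (exfalso; omega)
          · have hbe : bestOf r (lm :: t) = some (lm.1, PySem.Chars.rfind r lm.2) := by
              simp [bestOf, hv, hbt, hc]
            rw [hbe]
            try simp only [comb]
            try split_ifs <;> first | rfl | omega | (exfalso; omega)
      | some d0 =>
        by_cases hd : index - PySem.Chars.rfind r lm.2 < d0
        · have hstep : aStep index r (lv0, some d0) lm = (lm.1, some (index - PySem.Chars.rfind r lm.2)) := by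
            simp [aStep, hv, hd]
          rw [hstep, ih]
          cases hbt : bestOf r t with
          | none =>
            have hbe : bestOf r (lm :: t) = some (lm.1, PySem.Chars.rfind r lm.2) := by
              simp [bestOf, hv, hbt]
            rw [hbe]
            simp [comb, hd]
          | some p =>
            obtain ⟨lv', v'⟩ := p
            have hub := bestOf_nonneg r t lv' v' hbt
            by_cases hc : PySem.Chars.rfind r lm.2 < v'
            · have hbe : bestOf r (lm :: t) = some (lv', v') := by simp [bestOf, hv, hbt, hc]
              rw [hbe]
              try simp only [comb]
              try split_ifs <;> first | rfl | omega | (exfalso; omega)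
            · have hbe : bestOf r (lm :: t) = some (lm.1, PySem.Chars.rfind r lm.2) := by
                simp [bestOf, hv, hbt, hc]
              rw [hbe]
              try simp only [comb]
              try split_ifs <;> first | rfl | omega | (exfalso; omega)
        · have hstep : aStep index r (lv0, some d0) lm = (lv0, some d0) := by
            simp [aStep, hv, hd]
          rw [hstep, ih]
          cases hbt : bestOf r t with
          | none =>
            have hbe : bestOf r (lm :: t) = some (lm.1, PySem.Chars.rfind r lm.2) := by
              simp [bestOf, hv, hbt]
            rw [hbe]
            simp [comb, hd]
          | some p =>
            obtain ⟨lv', v'⟩ := p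
            have hub := bestOf_nonneg r t lv' v' hbt
            by_cases hc : PySem.Chars.rfind r lm.2 < v'
            · have hbe : bestOf r (lm :: t) = some (lv', v') := by simp [bestOf, hv, hbt, hc]
              rw [hbe]
              try simp only [comb]
              try split_ifs <;> first | rfl | omega | (exfalso; omega)
            · have hbe : bestOf r (lm :: t) = some (lm.1, PySem.Chars.rfind r lm.2) := by
                simp [bestOf, hv, hbt, hc]
              rw [hbe]
              try simp only [comb]
              try split_ifs <;> first | rfl | omega | (exfalso; omega)

def bFindAt (r : List Char) (L : List (Int × List Char)) (pos : Nat) : Option Int :=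
  L.findSome? (fun lm => if PySem.Chars.startswith (r.drop pos) lm.2 then some lm.1 else none)

def gScan (r : List Char) (L : List (Int × List Char)) : Nat → Int
  | 0 => 0
  | Nat.succ pos =>
    match bFindAt r L pos with
    | some level => level
    | none => gScan r L pos

theorem match_le_rfind (r sub : List Char) (hne : sub ≠ []) (p : Nat)
    (h : sub <+: r.drop p) : (p : Int) ≤ PySem.Chars.rfind r sub := by
  by_cases h1 : PySem.Chars.rfind r sub = -1
  · exact absurd h (rfind_neg1_iff r sub |>.mp h1 p)
  · obtain ⟨p', hval, _, _, habove⟩ := rfind_pos r sub hne h1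
    rw [hval]
    by_contra hc
    push Not at hc
    exact habove p (by exact_mod_cast hc) h

theorem bFindAt_none_iff (r : List Char) (L : List (Int × List Char)) (pos : Nat) :
    bFindAt r L pos = none ↔ ∀ lm ∈ L, ¬ lm.2 <+: r.drop pos := by
  unfold bFindAt
  rw [List.findSome?_eq_none_iff]
  constructor
  · intro h lm hm hc
    have := h lm hm
    rw [if_pos] at this
    · simp at this
    · simpa [PySem.Chars.startswith, List.isPrefixOf_iff_prefix] using hc
  · intro h lm hm
    rw [if_neg]
    simpa [PySem.Chars.startswith, List.isPrefixOf_iff_prefix] using h lm hm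

theorem bFindAt_hit (r : List Char) (L1 L2 : List (Int × List Char)) (lv : Int) (m : List Char) (pos : Nat)
    (hnone : ∀ lm ∈ L1, ¬ lm.2 <+: r.drop pos) (hm : m <+: r.drop pos) :
    bFindAt r (L1 ++ (lv, m) :: L2) pos = some lv := by
  unfold bFindAt
  rw [List.findSome?_append]
  have h1 : bFindAt r L1 pos = none := (bFindAt_none_iff r L1 pos).mpr hnone
  unfold bFindAt at h1
  rw [h1]
  simp [List.findSome?_cons, PySem.Chars.startswith, List.isPrefixOf_iff_prefix, hm]

theorem gScan_of_none (r : List Char) (L : List (Int × List Char)) (n : Nat)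
    (h : ∀ pos : Nat, pos < n → bFindAt r L pos = none) : gScan r L n = 0 := by
  induction n with
  | zero => rfl
  | succ k ih =>
    unfold gScan
    rw [h k (by omega)]
    exact ih fun pos hp => h pos (by omega)

theorem gScan_of_hit (r : List Char) (L : List (Int × List Char)) (n p : Nat) (lv : Int)
    (hp : p < n) (hhit : bFindAt r L p = some lv)
    (habove : ∀ q : Nat, p < q → q < n → bFindAt r L q = none) : gScan r L n = lv := by
  induction n with
  | zero => omega
  | succ k ih =>
    unfold gScan
    by_cases hk : p = k
    · subst hk; rw [hhit]
    · rw [habove k (by omega) (by omega)]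
      exact ih (by omega) fun q hq hq' => habove q hq (by omega)

theorem main_eq (index : Int) (r : List Char) (L : List (Int × List Char))
    (hne : ∀ lm ∈ L, lm.2 ≠ []) :
    (L.foldl (aStep index r) (0, none)).1 = gScan r L r.length := by
  rw [foldl_aStep_bestOf]
  cases hb : bestOf r L with
  | none =>
    have hall := (bestOf_none_iff r L).mp hb
    rw [gScan_of_none]
    · simp [comb]
    · intro pos _
      exact (bFindAt_none_iff r L pos).mpr fun lm hm hc => by
        have := (rfind_neg1_iff r lm.2).mp (hall lm hm) pos
        exact this hc
  | some p =>
    obtain ⟨lv, v⟩ := p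
    have hv0 := bestOf_nonneg r L lv v hb
    have hub := bestOf_ub r L lv v hb
    obtain ⟨L1, m, L2, heL, hmv, hstrict⟩ := bestOf_first r L lv v hb
    have hmne : m ≠ [] := hne (lv, m) (by rw [heL]; simp)
    obtain ⟨p, hval, hplen, hmatch, habove⟩ := rfind_pos r m hmne (by omega)
    have hvp : v = (p : Int) := by rw [hmv] at hval; exact hval
    rw [gScan_of_hit r L r.length p lv hplen]
    · simp [comb]
    · rw [heL]
      apply bFindAt_hit
      · intro lm hm hc
        have h1 : PySem.Chars.rfind r lm.2 < v := hstrict lm hm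
        have h2 : lm.2 ≠ [] := hne lm (by rw [heL]; exact List.mem_append_left _ hm)
        have h3 := match_le_rfind r lm.2 h2 p hc
        omega
      · exact hmatch
    · intro q hq hq'
      apply (bFindAt_none_iff r L q).mpr
      intro lm hm hc
      have h2 : lm.2 ≠ [] := hne lm hm
      have h3 := match_le_rfind r lm.2 h2 q hc
      have h4 := hub lm hm
      omega

-- concrete flat marker list (B's dict flattened; markers as char lists)
def pvFlatS : List (Int × String) := sectionMarkersA.flatMap (fun lm => lm.2.map (fun m => (lm.1, m)))
def pvFlat : List (Int × List Char) := pvFlatS.map (fun p => (p.1, p.2.toList))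

theorem rfindFrom_zero (s sub : List Char) (e : Int) :
    PySem.Chars.rfindFrom s sub 0 (some e) =
      PySem.Chars.rfind (s.take (PySem.List.clampIdx s.length e)) sub := by
  have hE : (if (s.length : Int) < e then (s.length : Int)
      else if e < 0 then if e + (s.length : Int) < 0 then 0 else e + (s.length : Int) else e)
      = ((PySem.List.clampIdx s.length e : Nat) : Int) := by
    unfold PySem.List.clampIdx
    split_ifs <;> omega
  unfold PySem.Chars.rfindFrom
  simp only [lt_self_iff_false, if_false, ite_false]
  rw [hE]
  simp only [Int.toNat_natCast, List.drop_zero, zero_add]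
  split_ifs with h0 h1
  · exfalso; omega
  · exact h1.symm
  · rfl

theorem region_toList (lt : String) (e : Int) :
    (PySem.Str.slice lt none (some e)).toList = lt.toList.take (PySem.List.clampIdx lt.toList.length e) := by
  simp [PySem.Str.toList_slice, PySem.Chars.slice, PySem.List.slice]

-- flatten the nested loops of both ports
theorem fold_flatten {σ : Type} (step : Int → String → σ → σ) (L : List (Int × List String)) :
    ∀ init : σ,
      L.foldl (fun st lm => lm.2.foldl (fun st marker => step lm.1 marker st) st) init
        = (L.flatMap (fun lm => lm.2.map (fun m => (lm.1, m)))).foldl (fun st p => step p.1 p.2 st) init := by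
  induction L with
  | nil => intro init; rfl
  | cons lm t ih =>
    intro init
    rw [List.foldl_cons, List.flatMap_cons, List.foldl_append, ih, List.foldl_map]

theorem findSome_flatten (g : Int → String → Option Int) (L : List (Int × List String)) :
    L.findSome? (fun lm => lm.2.findSome? (fun m => g lm.1 m))
      = (L.flatMap (fun lm => lm.2.map (fun m => (lm.1, m)))).findSome? (fun p => g p.1 p.2) := by
  induction L with
  | nil => rfl
  | cons lm t ih =>
    rw [List.findSome?_cons, List.flatMap_cons, List.findSome?_append, ← ih, List.findSome?_map]
    have h' : List.findSome? ((fun p => g p.1 p.2) ∘ fun m => (lm.1, m)) lm.2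
        = List.findSome? (fun m => g lm.1 m) lm.2 := rfl
    rw [h']
    cases h : List.findSome? (fun m => g lm.1 m) lm.2 <;> rfl

theorem bMatchAt_flat (region : List Char) (pos : Nat) :
    bMatchAt region pos = bFindAt region pvFlat pos := by
  unfold bMatchAt bFindAt pvFlat pvFlatS
  rw [findSome_flatten (fun lv m => if PySem.Chars.startswith (region.drop pos) m.toList then some lv else none)]
  rw [List.findSome?_map]
  rfl

theorem bScan_eq_gScan (region : List Char) (n : Nat) :
    bScan region n = gScan region pvFlat n := by
  induction n with
  | zero => rfl
  | succ k ih =>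
    unfold bScan gScan
    rw [bMatchAt_flat]
    cases bFindAt region pvFlat k with
    | none => exact ih
    | some lv => rfl

theorem pvFlat_nonempty : ∀ lm ∈ pvFlat, lm.2 ≠ [] := by decide

-- ===== VERDICT (by name: the statement is the Claim_ definition above) =====
theorem section_level_for_match_py_spec : Claim_equal_section_level_for_match_py := by
  unfold Claim_equal_section_level_for_match_py
  intro index text floors _
  unfold Spec_section_level_for_match_py
  unfold section_level_for_match_py section_level_for_match_py_alt
  by_cases hf : floors ≤ 1
  · simp [hf]
  · simp only [if_neg hf]
    rw [region_toList (PySem.Str.lower text) (index + 1)]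
    set lt := PySem.Str.lower text with hlt
    set r := lt.toList.take (PySem.List.clampIdx lt.toList.length (index + 1)) with hr
    have hA :
        (sectionMarkersA.foldl (fun (st : Int × Option Int) lm =>
          lm.2.foldl (fun (st : Int × Option Int) marker =>
            let markerIndex := PySem.Str.rfindFrom lt marker 0 (some (index + 1))
            if markerIndex < 0 then st
            else
              let distance := index - markerIndex
              match st.2 with
              | none => (lm.1, some distance)
              | some bestDistance =>
                if distance < bestDistance then (lm.1, some distance) else st) st)
          ((0 : Int), (none : Option Int)))
          = pvFlat.foldl (aStep index r) ((0 : Int), (none : Option Int)) := by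
      refine (fold_flatten (σ := Int × Option Int)
        (fun lv marker st =>
          let markerIndex := PySem.Str.rfindFrom lt marker 0 (some (index + 1))
          if markerIndex < 0 then st
          else
            let distance := index - markerIndex
            match st.2 with
            | none => (lv, some distance)
            | some bestDistance =>
              if distance < bestDistance then (lv, some distance) else st)
        sectionMarkersA ((0 : Int), (none : Option Int))).trans ?_
      unfold pvFlat pvFlatS
      rw [List.foldl_map]
      apply List.foldl_ext
      intro st p _
      simp only [aStep, PySem.Str.rfindFrom_eq, rfindFrom_zero]
      rw [← hr]
    rw [hA, bScan_eq_gScan]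
    exact main_eq index r pvFlat pvFlat_nonempty
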